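-- pv_equiv track=rewrite | github.com/Haimryck/TIPE | mastermind_jeu.py | all_code
-- ===== SOURCE A (Python) =====
-- C=['A','B','C','D','E','F','G','H','I','J']
--
-- def all_code(color): ###pb de size
--     L=[]
--     for i in range(0,color):
--         for j in range(0,color):
--             for f in range(0,color):
--                 for h in range(0,color):
--                     L.append([C[i],C[j],C[f],C[h]])
--     return L
-- ===== SOURCE B (Python) =====
-- C=['A','B','C','D','E','F','G','H','I','J']
--
-- def all_code(color):
--     # Build codes by prefix extension: four rounds, each extending every
--     # prefix by every color; prefixes outer / colors inner keeps the
--     # exact lexicographic order of the nested-loops version.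
--     result = [[]]
--     for _ in range(4):
--         result = [prefix + [C[c]] for prefix in result for c in range(color)]
--     return result
-- ===== Notes on version B (the rewrite author's own statement) =====
-- stated objective: simpler
-- what changed: Replaces the four hard-coded nested loops with a single prefix-extension loop run four times (result = [p + [C[c]] for p in result for c in range(color)]), preserving the same lexicographic order.
import Mathlib
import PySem

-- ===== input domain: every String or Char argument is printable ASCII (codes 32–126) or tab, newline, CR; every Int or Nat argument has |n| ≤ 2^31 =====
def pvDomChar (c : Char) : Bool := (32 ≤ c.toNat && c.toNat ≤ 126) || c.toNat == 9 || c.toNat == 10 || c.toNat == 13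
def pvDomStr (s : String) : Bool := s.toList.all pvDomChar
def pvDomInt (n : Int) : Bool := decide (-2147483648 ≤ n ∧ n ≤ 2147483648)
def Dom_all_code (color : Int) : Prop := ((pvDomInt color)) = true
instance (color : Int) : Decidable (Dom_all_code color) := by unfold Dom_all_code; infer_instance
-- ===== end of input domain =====

-- B builds the same list by prefix extension (one loop run four times) instead of four nested loops; objective: simpler.

-- the module constant C
def pvC : List String := ["A", "B", "C", "D", "E", "F", "G", "H", "I", "J"]

-- ===== PORT A =====
-- C[i] for 0 ≤ i < color ≤ 10 is always in range; the .getD "" default is never hit inside Pre_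
def all_code (color : Int) : List (List String) :=
  (PySem.List.pyRange 0 color 1).foldl (fun L i =>
    (PySem.List.pyRange 0 color 1).foldl (fun L j =>
      (PySem.List.pyRange 0 color 1).foldl (fun L f =>
        (PySem.List.pyRange 0 color 1).foldl (fun L h =>
          L ++ [[PySem.List.pyGetD pvC i "", PySem.List.pyGetD pvC j "",
                 PySem.List.pyGetD pvC f "", PySem.List.pyGetD pvC h ""]]) L) L) L) []

-- ===== PORT B =====
-- one round of prefix extension: [prefix + [C[c]] for prefix in result for c in range(color)]
def pvExtend (color : Int) (result : List (List String)) : List (List String) :=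
  result.flatMap (fun p => (PySem.List.pyRange 0 color 1).map (fun c => p ++ [PySem.List.pyGetD pvC c ""]))

def all_code_alt (color : Int) : List (List String) :=
  pvExtend color (pvExtend color (pvExtend color (pvExtend color [[]])))

-- ===== PRECONDITION & SPEC =====
-- Pre_ excludes color > 10, where Python A raises IndexError at C[i] (C has 10 elements)
def Pre_all_code (color : Int) : Prop := color ≤ 10
instance (color : Int) : Decidable (Pre_all_code color) := by unfold Pre_all_code; infer_instance
def pvWitness_all_code : Int := 3

def Spec_all_code (color : Int) (out : List (List String)) : Prop := out = all_code_alt color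
instance (color : Int) (out : List (List String)) : Decidable (Spec_all_code color out) := by unfold Spec_all_code; infer_instance

-- ===== CLAIM (what is proved, stated in full; the proofs are below) =====
def Claim_equal_all_code : Prop := ∀ (color : Int), Dom_all_code color → Pre_all_code color → Spec_all_code color (all_code color)

-- ===== LEMMAS AND PROOFS =====

theorem all_code_eq_flatMap (color : Int) :
    all_code color =
      (PySem.List.pyRange 0 color 1).flatMap (fun i =>
        (PySem.List.pyRange 0 color 1).flatMap (fun j =>
          (PySem.List.pyRange 0 color 1).flatMap (fun f =>
            (PySem.List.pyRange 0 color 1).map (fun h =>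
              [PySem.List.pyGetD pvC i "", PySem.List.pyGetD pvC j "",
               PySem.List.pyGetD pvC f "", PySem.List.pyGetD pvC h ""])))) := by
  unfold all_code
  simp only [PySem.List.foldl_append_singleton_eq_map, PySem.List.foldl_append_eq_flatMap,
    List.nil_append]

theorem all_code_alt_eq_flatMap (color : Int) :
    all_code_alt color =
      (PySem.List.pyRange 0 color 1).flatMap (fun i =>
        (PySem.List.pyRange 0 color 1).flatMap (fun j =>
          (PySem.List.pyRange 0 color 1).flatMap (fun f =>
            (PySem.List.pyRange 0 color 1).map (fun h =>
              [PySem.List.pyGetD pvC i "", PySem.List.pyGetD pvC j "",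
               PySem.List.pyGetD pvC f "", PySem.List.pyGetD pvC h ""])))) := by
  unfold all_code_alt pvExtend
  simp [List.flatMap_map, List.flatMap_assoc]

-- ===== VERDICT (by name: the statement is the Claim_ definition above) =====
theorem all_code_spec : Claim_equal_all_code := by
  intro color _ _
  unfold Spec_all_code
  rw [all_code_eq_flatMap, all_code_alt_eq_flatMap]
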